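-- pv_equiv track=rewrite | github.com/jespernytun/Advent25 | Exo2/Day2.py | checkInterval
-- ===== SOURCE A (Python) =====
-- def checkInterval(start, end):
--     tot = 0 # Initialize total
--     for number in range(start,end+1):
--         # Condition 1: Lenght of number is even
--         if len(str(number)) % 2 != 0:
--             continue
--         # Condition 2: Slice one equal to slice two
--         if str(number)[:(len(str(number))//2)] != str(number)[len(str(number))//2:]:
--             continue
--         # Condition 3: Number does not start with a zero
--         if str(number)[0] == 0:
--             continue
--         else:
--             tot += int(str(number)) # All conditions met, therefor number is invalid
--
--     return tot
-- ===== SOURCE B (Python) =====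
-- def checkInterval(start, end):
--     # Count the decimal digits of end; doubled numbers have 2k digits, so k <= K//2.
--     K = 0
--     t = end
--     while t > 0:
--         t = t // 10
--         K += 1
--     tot = 0
--     for k in range(1, K // 2 + 1):
--         m = 10 ** k + 1
--         lo = max(10 ** (k - 1), -((-max(start, 1)) // m))
--         hi = min(10 ** k - 1, end // m)
--         if lo <= hi:
--             tot += (m * (lo + hi) * (hi - lo + 1)) // 2
--     return tot
-- ===== Notes on version B (the rewrite author's own statement) =====
-- stated objective: faster
-- what changed: Instead of scanning every number in [start,end] and testing its decimal string, B enumerates the 'doubled' numbers directly as h*(10^k+1) with 10^(k-1) <= h < 10^k and sums each k-block with the closed-form arithmetic-series formula; intended as asymptotically faster on wide ranges (timing runs measured 122x-430x at the largest size; on near-empty ranges both are equally instant).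
import Mathlib
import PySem

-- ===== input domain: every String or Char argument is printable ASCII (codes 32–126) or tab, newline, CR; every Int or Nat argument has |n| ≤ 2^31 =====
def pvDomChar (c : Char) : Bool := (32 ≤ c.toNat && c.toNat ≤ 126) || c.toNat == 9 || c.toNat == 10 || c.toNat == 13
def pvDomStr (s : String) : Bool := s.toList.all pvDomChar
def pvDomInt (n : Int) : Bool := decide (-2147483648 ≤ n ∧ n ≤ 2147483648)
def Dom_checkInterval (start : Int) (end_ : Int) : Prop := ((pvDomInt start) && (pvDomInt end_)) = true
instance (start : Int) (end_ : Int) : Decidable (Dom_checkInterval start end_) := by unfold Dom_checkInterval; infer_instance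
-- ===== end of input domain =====

-- B replaces A's scan of every number in [start, end] by a direct enumeration of the
-- "doubled" numbers h*(10^k+1) (10^(k-1) ≤ h < 10^k), summing each k-block in closed form
-- (asymptotically fewer steps on wide ranges; on near-empty ranges both are equally cheap).


-- ===== PORT A =====
-- Literal port of A. str(number) is ported as its list of characters (PySem.Int.toChars;
-- the PySem.Str string primitives are thin wrappers over exactly these char lists).
-- Two Python subtleties kept exact: `str(number)[0] == 0` compares a str with an int and is
-- therefore always False in Python (ported as `false`); `int(str(number))` is exactly `number`
-- (Python's int→str→int roundtrip is the identity).
def checkInterval (start : Int) (end_ : Int) : Int :=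
  (PySem.List.pyRange start (end_ + 1) 1).foldl
    (fun tot number =>
      let s := PySem.Int.toChars number
      let L := PySem.List.len s
      if PySem.Int.mod L 2 ≠ 0 then tot
      else if PySem.List.slice s none (some (PySem.Int.floordiv L 2)) ≠
              PySem.List.slice s (some (PySem.Int.floordiv L 2)) none then tot
      else if (false : Bool) then tot
      else tot + number)
    0

-- ===== PORT B =====
-- while t > 0: t //= 10; K += 1   (the decimal digit count of end)
def digitCount (t : Int) : Int :=
  if h : 0 < t then digitCount (PySem.Int.floordiv t 10) + 1 else 0
  termination_by t.toNat
  decreasing_by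
    simp only [PySem.Int.floordiv_eq_ediv_of_pos (by omega : (0:Int) < 10)]
    omega

def checkInterval_alt (start : Int) (end_ : Int) : Int :=
  let K := digitCount end_
  (PySem.List.pyRange 1 (PySem.Int.floordiv K 2 + 1) 1).foldl
    (fun tot k =>
      let m := (10 : Int) ^ k.toNat + 1
      let lo := max ((10 : Int) ^ (k - 1).toNat) (-(PySem.Int.floordiv (-(max start 1)) m))
      let hi := min ((10 : Int) ^ k.toNat - 1) (PySem.Int.floordiv end_ m)
      if lo ≤ hi then tot + PySem.Int.floordiv (m * (lo + hi) * (hi - lo + 1)) 2 else tot)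
    0

-- ===== PRECONDITION & SPEC =====
def Spec_checkInterval (start : Int) (end_ : Int) (out : Int) : Prop := out = checkInterval_alt start end_
instance (start : Int) (end_ : Int) (out : Int) : Decidable (Spec_checkInterval start end_ out) := by unfold Spec_checkInterval; infer_instance

-- ===== CLAIM (what is proved, stated in full; the proofs are below) =====
def Claim_equal_checkInterval : Prop := ∀ (start : Int) (end_ : Int), Dom_checkInterval start end_ → Spec_checkInterval start end_ (checkInterval start end_)

-- ===== LEMMAS AND PROOFS =====

-- The Boolean test A applies to each loop number (its two live conditions).
def goodb (n : Int) : Bool :=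
  decide (PySem.Int.mod (PySem.List.len (PySem.Int.toChars n)) 2 = 0) &&
  decide (PySem.List.slice (PySem.Int.toChars n) none
            (some (PySem.Int.floordiv (PySem.List.len (PySem.Int.toChars n)) 2)) =
          PySem.List.slice (PySem.Int.toChars n)
            (some (PySem.Int.floordiv (PySem.List.len (PySem.Int.toChars n)) 2)) none)

-- n is a "doubled" number: its decimal string is a k-digit block written twice.
def dubP (n : Int) : Prop :=
  ∃ k h : ℕ, 1 ≤ k ∧ 10 ^ (k - 1) ≤ h ∧ h < 10 ^ k ∧ n = (h : Int) * ((10 : Int) ^ k + 1)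

theorem digitCount_nonneg (t : Int) : 0 ≤ digitCount t := by
  induction t using digitCount.induct with
  | case1 t h ih => rw [digitCount, dif_pos h]; omega
  | case2 t h => rw [digitCount, dif_neg h]

theorem lt_pow_digitCount (t : Int) : t < (10 : Int) ^ (digitCount t).toNat := by
  induction t using digitCount.induct with
  | case1 t h ih =>
    rw [digitCount, dif_pos h]
    have hnn := digitCount_nonneg (PySem.Int.floordiv t 10)
    rw [PySem.Int.floordiv_eq_ediv_of_pos (by omega : (0:Int) < 10)] at ih hnn ⊢
    rw [show ((digitCount (t / 10) + 1).toNat) = (digitCount (t / 10)).toNat + 1 by omega]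
    rw [pow_succ]
    have h2 : t < ((10:Int) ^ (digitCount (t/10)).toNat - 1 + 1) * 10 := by omega
    nlinarith [pow_nonneg (by norm_num : (0:Int) ≤ 10) (digitCount (t/10)).toNat]
  | case2 t h =>
    rw [digitCount, dif_neg h]
    simpa using by omega

-- Nat.toDigits (what PySem.Int.toChars uses) written through Nat.digits
theorem toDigitsCore_eq_digits (f : ℕ) : ∀ (n : ℕ) (l : List Char), 0 < n → n < 10 ^ f →
    Nat.toDigitsCore 10 f n l = ((Nat.digits 10 n).map Nat.digitChar).reverse ++ l := by
  induction f with
  | zero => intro n l h1 h2; omega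
  | succ f ih =>
    intro n l h1 h2
    rw [Nat.toDigitsCore]
    rw [Nat.digits_def' (by norm_num : 1 < 10) h1]
    by_cases hq : n / 10 = 0
    · simp [hq, Nat.digits_zero]
    · rw [if_neg hq, ih (n / 10) _ (by omega) (by omega)]
      simp

theorem toDigits_eq_digits (n : ℕ) (hn : 0 < n) :
    Nat.toDigits 10 n = ((Nat.digits 10 n).map Nat.digitChar).reverse := by
  rw [Nat.toDigits]
  rw [toDigitsCore_eq_digits (n+1) n [] hn (by calc n < 10 ^ n := Nat.lt_pow_self (by norm_num)
                                                _ ≤ 10 ^ (n+1) := Nat.pow_le_pow_right (by norm_num) (by omega))]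
  simp

theorem digitChar_inj_lt10 : ∀ d < 10, ∀ e < 10, Nat.digitChar d = Nat.digitChar e → d = e := by decide

theorem digitChar_ne_dash : ∀ d < 10, Nat.digitChar d ≠ '-' := by decide

theorem map_digitChar_inj : ∀ (l1 l2 : List ℕ), (∀ x ∈ l1, x < 10) → (∀ x ∈ l2, x < 10) →
    l1.map Nat.digitChar = l2.map Nat.digitChar → l1 = l2 := by
  intro l1
  induction l1 with
  | nil => intro l2 _ _ h; cases l2 <;> simp_all
  | cons a l ih =>
    intro l2 h1 h2 h
    cases l2 with
    | nil => simp_all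
    | cons b l2' =>
      simp only [List.map_cons, List.cons.injEq] at h
      have := digitChar_inj_lt10 a (h1 a (by simp)) b (h2 b (by simp)) h.1
      rw [this, ih l2' (fun x hx => h1 x (by simp [hx])) (fun x hx => h2 x (by simp [hx])) h.2]

theorem digits_length_eq_iff (h k : ℕ) (hh : 0 < h) (hk : 1 ≤ k) :
    (Nat.digits 10 h).length = k ↔ 10 ^ (k - 1) ≤ h ∧ h < 10 ^ k := by
  rw [Nat.length_digits 10 h (by norm_num) (by omega)]
  constructor
  · rintro rfl
    simp only [Nat.add_sub_cancel]
    exact ⟨Nat.pow_log_le_self 10 (by omega), Nat.lt_pow_succ_log_self (by norm_num) h⟩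
  · rintro ⟨h1, h2⟩
    have := Nat.log_eq_of_pow_le_of_lt_pow h1 (by rw [show k - 1 + 1 = k by omega]; exact h2)
    omega

-- a positive Nat m has digit list T ++ T  iff  m = h*(10^k+1) with h of exactly k digits
theorem dub_digits_iff (m : ℕ) (hm : 0 < m) :
    (∃ k : ℕ, (Nat.digits 10 m).length = 2 * k ∧
        (Nat.digits 10 m).take k = (Nat.digits 10 m).drop k) ↔
    (∃ k h : ℕ, 1 ≤ k ∧ 10 ^ (k - 1) ≤ h ∧ h < 10 ^ k ∧ m = h * (10 ^ k + 1)) := by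
  constructor
  · rintro ⟨k, hlen, heq⟩
    have hk : 1 ≤ k := by
      rcases Nat.eq_zero_or_pos k with rfl | h
      · simp only [Nat.mul_zero, List.length_eq_zero_iff] at hlen
        rw [Nat.digits_eq_nil_iff_eq_zero] at hlen; omega
      · exact h
    set D := Nat.digits 10 m with hD
    set h := m % 10 ^ k with hh
    have hmod : m % 10 ^ k = Nat.ofDigits 10 (D.take k) := Nat.self_mod_pow_eq_ofDigits_take k m (by norm_num)
    have hdiv : m / 10 ^ k = Nat.ofDigits 10 (D.drop k) := Nat.self_div_pow_eq_ofDigits_drop k m (by norm_num)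
    have hdm : m / 10 ^ k = h := by rw [hdiv, ← heq, ← hmod]
    have hmeq : m = h * (10 ^ k + 1) := by
      have h1 := Nat.div_add_mod m (10 ^ k)
      rw [hdm, ← hh] at h1
      rw [Nat.mul_add, Nat.mul_one]
      linarith
    refine ⟨k, h, hk, ?_, Nat.mod_lt m (by positivity), hmeq⟩
    have hDne : D ≠ [] := Nat.digits_ne_nil_iff_ne_zero.mpr (by omega)
    have htakene : D.take k ≠ [] := by
      intro hcon
      have := congrArg List.length hcon
      simp [hlen] at this
      omega
    have hgl? : (D.take k).getLast? = D.getLast? := by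
      conv_rhs => rw [show D = D.take k ++ D.drop k by simp, ← heq]
      rw [List.getLast?_append_of_ne_nil _ htakene]
    have hlastD : D.getLast hDne ≠ 0 := Nat.getLast_digit_ne_zero 10 (by omega : m ≠ 0)
    have hlast : (D.take k).getLast htakene ≠ 0 := by
      have e1 : (D.take k).getLast? = some ((D.take k).getLast htakene) := List.getLast?_eq_some_getLast _
      have e2 : D.getLast? = some (D.getLast hDne) := List.getLast?_eq_some_getLast _
      rw [e1, e2, Option.some_inj] at hgl?
      rw [hgl?]
      exact hlastD
    have hdig : Nat.digits 10 h = D.take k := by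
      rw [hh, hmod]
      exact Nat.digits_ofDigits 10 (by norm_num) _
        (fun l hl => Nat.digits_lt_base (by norm_num) (List.mem_of_mem_take hl))
        (fun _ => hlast)
    have hlentake : (Nat.digits 10 h).length = k := by
      rw [hdig, List.length_take, hlen]; omega
    have hpos : 0 < h := Nat.pos_of_ne_zero (fun h0 => htakene (by rw [← hdig, h0]; simp))
    exact ((digits_length_eq_iff h k hpos hk).mp hlentake).1
  · rintro ⟨k, h, hk, hlo, hhi, rfl⟩
    have hpos : 0 < h := lt_of_lt_of_le (by positivity) hlo
    have hlen : (Nat.digits 10 h).length = k := (digits_length_eq_iff h k hpos hk).mpr ⟨hlo, hhi⟩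
    set Dh := Nat.digits 10 h with hDh
    have hDhne : Dh ≠ [] := by rw [hDh]; exact Nat.digits_ne_nil_iff_ne_zero.mpr (by omega)
    have hlast : ∀ p : Dh ++ Dh ≠ [], (Dh ++ Dh).getLast p ≠ 0 := by
      intro p
      rw [List.getLast_append_of_ne_nil p hDhne]
      exact Nat.getLast_digit_ne_zero 10 (by omega)
    have hof : Nat.ofDigits 10 (Dh ++ Dh) = h * (10 ^ k + 1) := by
      rw [Nat.ofDigits_append]
      rw [hDh, Nat.ofDigits_digits, ← hDh, hlen]
      ring
    have hdig : Nat.digits 10 (h * (10 ^ k + 1)) = Dh ++ Dh := by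
      rw [← hof]
      refine Nat.digits_ofDigits 10 (by norm_num) _ (fun l hl => ?_) hlast
      have h' : l ∈ Nat.digits 10 h := by
        rcases List.mem_append.mp hl with h' | h' <;> simpa [hDh] using h'
      exact Nat.digits_lt_base (by norm_num) h'
    refine ⟨k, ?_, ?_⟩
    · rw [hdig, List.length_append, hlen]; ring
    · rw [hdig, List.take_left' hlen, List.drop_left' hlen]

theorem goodb_iff_lists (n : Int) :
    goodb n = true ↔ ∃ k : ℕ, (PySem.Int.toChars n).length = 2 * k ∧
      (PySem.Int.toChars n).take k = (PySem.Int.toChars n).drop k := by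
  unfold goodb
  set s := PySem.Int.toChars n with hs
  simp only [PySem.List.len_eq, Bool.and_eq_true, decide_eq_true_eq]
  rw [PySem.Int.mod_eq_emod_of_pos (by omega : (0:Int) < 2)]
  rw [show ((2:Int) = ((2:ℕ):Int)) by norm_num, PySem.Int.floordiv_natCast s.length 2]
  rw [PySem.List.slice_to_natCast, PySem.List.slice_from_natCast]
  constructor
  · rintro ⟨h1, h2⟩
    exact ⟨s.length / 2, by omega, h2⟩
  · rintro ⟨k, hk, h2⟩
    constructor
    · omega
    · rw [show s.length / 2 = k by omega]; exact h2

theorem dubP_pos {n : Int} (h : dubP n) : 11 ≤ n := by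
  obtain ⟨k, h', hk, hlo, hhi, rfl⟩ := h
  have h1 : 1 ≤ h' := le_trans (Nat.one_le_pow _ _ (by norm_num)) hlo
  have h2 : (10:Int) ^ 1 ≤ (10:Int) ^ k := pow_le_pow_right₀ (by norm_num) hk
  have h3 : (1:Int) ≤ (h' : Int) := by exact_mod_cast h1
  nlinarith

theorem goodb_iff (n : Int) : goodb n = true ↔ dubP n := by
  rw [goodb_iff_lists]
  rcases lt_trichotomy n 0 with hneg | rfl | hpos
  · constructor
    · rintro ⟨k, hlen, heq⟩
      exfalso
      have hs : PySem.Int.toChars n = '-' :: Nat.toDigits 10 n.natAbs := by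
        rw [PySem.Int.toChars, if_pos hneg]
      have hd : Nat.toDigits 10 n.natAbs = ((Nat.digits 10 n.natAbs).map Nat.digitChar).reverse :=
        toDigits_eq_digits _ (by omega)
      rw [hs] at hlen heq
      have hk : 1 ≤ k := by simp at hlen; omega
      obtain ⟨k', rfl⟩ : ∃ k', k = k' + 1 := ⟨k - 1, by omega⟩
      rw [List.take_succ_cons, List.drop_succ_cons] at heq
      have hmem : '-' ∈ (Nat.toDigits 10 n.natAbs) := by
        have : '-' ∈ (Nat.toDigits 10 n.natAbs).drop k' := by rw [← heq]; exact List.mem_cons_self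
        exact List.mem_of_mem_drop this
      rw [hd] at hmem
      simp only [List.mem_reverse, List.mem_map] at hmem
      obtain ⟨d, hdmem, hdc⟩ := hmem
      exact digitChar_ne_dash d (Nat.digits_lt_base (by norm_num) hdmem) hdc
    · intro h; exact absurd (dubP_pos h) (by omega)
  · constructor
    · rintro ⟨k, hlen, heq⟩
      exfalso
      have : PySem.Int.toChars 0 = ['0'] := by decide
      rw [this] at hlen
      simp at hlen
      omega
    · intro h; exact absurd (dubP_pos h) (by omega)
  · have hs : PySem.Int.toChars n = ((Nat.digits 10 n.toNat).map Nat.digitChar).reverse := by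
      rw [PySem.Int.toChars, if_neg (by omega)]
      exact toDigits_eq_digits _ (by omega)
    set D := Nat.digits 10 n.toNat with hD
    have hDlt : ∀ x ∈ D, x < 10 := fun x hx => Nat.digits_lt_base (by norm_num) hx
    have key : ∀ k : ℕ, D.length = 2 * k →
        (((D.map Nat.digitChar).reverse.take k = (D.map Nat.digitChar).reverse.drop k) ↔
         (D.take k = D.drop k)) := by
      intro k hlen
      set M := D.map Nat.digitChar with hM
      have hMlen : M.length = 2 * k := by simp [hM, hlen]
      rw [List.take_reverse, List.drop_reverse, hMlen]
      rw [show 2 * k - k = k by omega]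
      constructor
      · intro h
        have h2 : M.drop k = M.take k := List.reverse_injective h
        have h3 : D.drop k = D.take k := by
          apply map_digitChar_inj
          · exact fun x hx => hDlt x (List.mem_of_mem_drop hx)
          · exact fun x hx => hDlt x (List.mem_of_mem_take hx)
          · rw [List.map_drop, List.map_take]; exact h2
        exact h3.symm
      · intro h
        rw [hM, ← List.map_drop, ← List.map_take, ← h]
    constructor
    · rintro ⟨k, hlen, heq⟩
      rw [hs] at hlen heq
      have hlenD : D.length = 2 * k := by simpa using hlen
      have := (key k hlenD).mp heq
      have hdub := (dub_digits_iff n.toNat (by omega)).mp ⟨k, hlenD, this⟩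
      obtain ⟨k', h', hk, hlo, hhi, hm⟩ := hdub
      refine ⟨k', h', hk, hlo, hhi, ?_⟩
      have : ((n.toNat : ℕ) : Int) = n := Int.toNat_of_nonneg (by omega)
      rw [← this, hm]
      push_cast
      ring
    · rintro ⟨k, h', hk, hlo, hhi, hn⟩
      have hmnat : n.toNat = h' * (10 ^ k + 1) := by
        have : ((h' * (10 ^ k + 1) : ℕ) : Int) = n := by rw [hn]; push_cast; ring
        omega
      obtain ⟨k2, hlen2, heq2⟩ := (dub_digits_iff n.toNat (by omega)).mpr ⟨k, h', hk, hlo, hhi, hmnat⟩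
      refine ⟨k2, ?_, ?_⟩
      · rw [hs]; simpa using hlen2
      · rw [hs]; exact (key k2 hlen2).mpr heq2

theorem sum_range_shift (G : Int → Int) (a : Int) (N : ℕ) :
    ∑ i ∈ Finset.range N, G (a + i) = ∑ n ∈ Finset.Icc a (a + N - 1), G n := by
  induction N with
  | zero => simp
  | succ N ih =>
    rw [Finset.sum_range_succ, ih]
    rw [show (a + ↑(N + 1) - 1) = (a + ↑N - 1) + 1 by push_cast; ring]
    rw [← Finset.insert_Icc_right_eq_Icc_add_one (by omega), Finset.sum_insert (by simp)]
    rw [show a + ↑N - 1 + 1 = a + ↑N by ring]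
    ring

theorem portA_eq_sum (start end_ : Int) :
    checkInterval start end_ = ∑ n ∈ Finset.Icc start end_, (if goodb n then n else 0) := by
  unfold checkInterval
  have hstep : (fun (tot number : Int) =>
      let s := PySem.Int.toChars number
      let L := PySem.List.len s
      if PySem.Int.mod L 2 ≠ 0 then tot
      else if PySem.List.slice s none (some (PySem.Int.floordiv L 2)) ≠
              PySem.List.slice s (some (PySem.Int.floordiv L 2)) none then tot
      else if (false : Bool) then tot
      else tot + number) =
      fun tot number => tot + (if goodb number then number else 0) := by
    funext tot n
    show (if PySem.Int.mod (PySem.List.len (PySem.Int.toChars n)) 2 ≠ 0 then tot else _) = _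
    by_cases h1 : PySem.Int.mod (PySem.List.len (PySem.Int.toChars n)) 2 = 0
    · rw [if_neg (not_not_intro h1)]
      by_cases h2 : PySem.List.slice (PySem.Int.toChars n) none
          (some (PySem.Int.floordiv (PySem.List.len (PySem.Int.toChars n)) 2)) =
        PySem.List.slice (PySem.Int.toChars n)
          (some (PySem.Int.floordiv (PySem.List.len (PySem.Int.toChars n)) 2)) none
      · rw [if_neg (not_not_intro h2)]
        have hg : goodb n = true := by
          unfold goodb
          rw [decide_eq_true h1, decide_eq_true h2]
          rfl
        rw [hg]
        simp
      · rw [if_pos h2]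
        have hg : goodb n = false := by
          unfold goodb
          rw [decide_eq_false h2]
          simp
        rw [hg]
        simp
    · rw [if_pos h1]
      have hg : goodb n = false := by
        unfold goodb
        rw [decide_eq_false h1]
        simp
      rw [hg]
      simp
  rw [hstep, PySem.List.foldl_add]
  rw [PySem.List.pyRange_one, List.map_map]
  rw [show ((List.range (end_ + 1 - start).toNat).map
        ((fun n => if goodb n then n else 0) ∘ fun k => start + ↑k)).sum =
      ∑ i ∈ Finset.range (end_ + 1 - start).toNat, (if goodb (start + ↑i) then start + ↑i else 0) from
    Int.neg_inj.mp rfl]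
  rw [sum_range_shift (fun n => if goodb n then n else 0) start]
  rcases le_or_gt start (end_ + 1) with hle | hgt
  · rw [show start + ↑(end_ + 1 - start).toNat - 1 = end_ by omega]
    simp
  · rw [Finset.Icc_eq_empty_of_lt (by omega), Finset.Icc_eq_empty_of_lt (by omega)]
    simp

theorem sum_Icc_id_int (a b : Int) (h : a ≤ b) :
    (∑ x ∈ Finset.Icc a b, x) * 2 = (a + b) * (b - a + 1) := by
  obtain ⟨N, hN⟩ : ∃ N : ℕ, b = a + N := ⟨(b - a).toNat, by omega⟩
  subst hN
  induction N with
  | zero => simp; ring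
  | succ N ih =>
    rw [show a + ↑(N + 1) = (a + ↑N) + 1 by push_cast; ring]
    rw [← Finset.insert_Icc_right_eq_Icc_add_one (by omega), Finset.sum_insert (by simp)]
    have := ih (by omega)
    push_cast at this
    nlinarith

theorem term_eq_image_sum (m lo hi : Int) (hm : 0 < m) :
    (if lo ≤ hi then PySem.Int.floordiv (m * (lo + hi) * (hi - lo + 1)) 2 else 0) =
      ∑ n ∈ (Finset.Icc lo hi).image (fun h => h * m), n := by
  by_cases hle : lo ≤ hi
  · rw [if_pos hle]
    rw [Finset.sum_image (by intro x _ y _ hxy; exact mul_right_cancel₀ (by omega) hxy)]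
    rw [show (∑ h ∈ Finset.Icc lo hi, h * m) = (∑ h ∈ Finset.Icc lo hi, h) * m by
      rw [Finset.sum_mul]]
    rw [PySem.Int.floordiv_eq_ediv_of_pos (by omega : (0:Int) < 2)]
    have hg := sum_Icc_id_int lo hi hle
    have : m * (lo + hi) * (hi - lo + 1) = ((∑ x ∈ Finset.Icc lo hi, x) * m) * 2 := by
      nlinarith [hg]
    rw [this, Int.mul_ediv_cancel _ (by omega)]
  · rw [if_neg hle, Finset.Icc_eq_empty hle]
    simp

theorem portB_eq_sum (start end_ : Int) :
    checkInterval_alt start end_ =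
      ∑ k ∈ Finset.Icc (1 : Int) (PySem.Int.floordiv (digitCount end_) 2),
        ∑ n ∈ (Finset.Icc (max ((10:Int) ^ (k-1).toNat) (-(PySem.Int.floordiv (-(max start 1)) ((10:Int) ^ k.toNat + 1))))
                          (min ((10:Int) ^ k.toNat - 1) (PySem.Int.floordiv end_ ((10:Int) ^ k.toNat + 1)))).image
                (fun h => h * ((10:Int) ^ k.toNat + 1)), n := by
  unfold checkInterval_alt
  have hstep : (fun (tot k : Int) =>
      let m := (10 : Int) ^ k.toNat + 1
      let lo := max ((10 : Int) ^ (k - 1).toNat) (-(PySem.Int.floordiv (-(max start 1)) m))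
      let hi := min ((10 : Int) ^ k.toNat - 1) (PySem.Int.floordiv end_ m)
      if lo ≤ hi then tot + PySem.Int.floordiv (m * (lo + hi) * (hi - lo + 1)) 2 else tot) =
      fun tot k => tot +
        ∑ n ∈ (Finset.Icc (max ((10:Int) ^ (k-1).toNat) (-(PySem.Int.floordiv (-(max start 1)) ((10:Int) ^ k.toNat + 1))))
                          (min ((10:Int) ^ k.toNat - 1) (PySem.Int.floordiv end_ ((10:Int) ^ k.toNat + 1)))).image
                (fun h => h * ((10:Int) ^ k.toNat + 1)), n := by
    funext tot k
    rw [← term_eq_image_sum _ _ _ (by positivity)]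
    by_cases hle : (max ((10:Int) ^ (k-1).toNat) (-(PySem.Int.floordiv (-(max start 1)) ((10:Int) ^ k.toNat + 1)))) ≤
        (min ((10:Int) ^ k.toNat - 1) (PySem.Int.floordiv end_ ((10:Int) ^ k.toNat + 1)))
    · rw [if_pos hle, if_pos hle]
    · rw [if_neg hle, if_neg hle]; ring
  rw [hstep, PySem.List.foldl_add, PySem.List.pyRange_one, List.map_map]
  set G : Int → Int := fun k =>
        ∑ n ∈ (Finset.Icc (max ((10:Int) ^ (k-1).toNat) (-(PySem.Int.floordiv (-(max start 1)) ((10:Int) ^ k.toNat + 1))))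
                          (min ((10:Int) ^ k.toNat - 1) (PySem.Int.floordiv end_ ((10:Int) ^ k.toNat + 1)))).image
                (fun h => h * ((10:Int) ^ k.toNat + 1)), n with hG
  set N := (PySem.Int.floordiv (digitCount end_) 2 + 1 - 1).toNat with hN
  rw [show (List.map (G ∘ fun k : ℕ => (1:Int) + ↑k) (List.range N)).sum =
      ∑ i ∈ Finset.range N, G (1 + (i : Int)) from Int.neg_inj.mp rfl]
  rw [sum_range_shift G 1 N]
  have hnn : 0 ≤ PySem.Int.floordiv (digitCount end_) 2 := by
    have := digitCount_nonneg end_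
    rw [PySem.Int.floordiv_eq_ediv_of_pos (by omega : (0:Int) < 2)]
    omega
  rw [show (1 : Int) + ↑N - 1 = PySem.Int.floordiv (digitCount end_) 2 by omega]
  simp

-- ceiling-division bracket: -((-a) // m) ≤ h ↔ a ≤ h * m  (0 < m)
theorem ceil_le_iff (a m h : Int) (hm : 0 < m) :
    -(PySem.Int.floordiv (-a) m) ≤ h ↔ a ≤ h * m := by
  rw [PySem.Int.floordiv_eq_ediv_of_pos hm, neg_le, Int.le_ediv_iff_mul_le hm]
  constructor <;> intro H <;> nlinarith

theorem le_fdiv_iff (e m h : Int) (hm : 0 < m) :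
    h ≤ PySem.Int.floordiv e m ↔ h * m ≤ e := by
  rw [PySem.Int.floordiv_eq_ediv_of_pos hm]
  exact Int.le_ediv_iff_mul_le hm

theorem mem_blockS_iff (start end_ k : Int) (n : Int) :
    (n ∈ (Finset.Icc (max ((10:Int) ^ (k-1).toNat) (-(PySem.Int.floordiv (-(max start 1)) ((10:Int) ^ k.toNat + 1))))
                     (min ((10:Int) ^ k.toNat - 1) (PySem.Int.floordiv end_ ((10:Int) ^ k.toNat + 1)))).image
          (fun h => h * ((10:Int) ^ k.toNat + 1))) ↔ ∃ h : Int,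
      ((10:Int) ^ (k-1).toNat ≤ h ∧ h ≤ (10:Int) ^ k.toNat - 1) ∧
      (max start 1 ≤ h * ((10:Int) ^ k.toNat + 1) ∧ h * ((10:Int) ^ k.toNat + 1) ≤ end_) ∧
      n = h * ((10:Int) ^ k.toNat + 1) := by
  rw [Finset.mem_image]
  constructor
  · rintro ⟨h, hmem, rfl⟩
    rw [Finset.mem_Icc, max_le_iff, le_min_iff] at hmem
    obtain ⟨⟨h1, h2⟩, h3, h4⟩ := hmem
    exact ⟨h, ⟨h1, h3⟩, ⟨(ceil_le_iff _ _ _ (by positivity)).mp h2, (le_fdiv_iff _ _ _ (by positivity)).mp h4⟩, rfl⟩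
  · rintro ⟨h, ⟨h1, h3⟩, ⟨h2, h4⟩, rfl⟩
    refine ⟨h, ?_, rfl⟩
    rw [Finset.mem_Icc, max_le_iff, le_min_iff]
    exact ⟨⟨h1, (ceil_le_iff _ _ _ (by positivity)).mpr h2⟩, h3, (le_fdiv_iff _ _ _ (by positivity)).mpr h4⟩

-- every element of block k lies strictly between 10^(2k-1) and 10^(2k)
theorem blockS_bracket (k h : Int) (hk : 1 ≤ k)
    (h1 : (10:Int) ^ (k-1).toNat ≤ h) (h2 : h ≤ (10:Int) ^ k.toNat - 1) :
    (10:Int) ^ (2 * k.toNat - 1) < h * ((10:Int) ^ k.toNat + 1) ∧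
    h * ((10:Int) ^ k.toNat + 1) < (10:Int) ^ (2 * k.toNat) := by
  have e1 : (10:Int) ^ (2 * k.toNat - 1) = 10 ^ (k-1).toNat * 10 ^ k.toNat := by
    rw [← pow_add]; congr 1; omega
  have e2 : (10:Int) ^ (2 * k.toNat) = 10 ^ k.toNat * 10 ^ k.toNat := by
    rw [← pow_add]; congr 1; omega
  have p1 : (0:Int) < 10 ^ (k-1).toNat := by positivity
  have p2 : (0:Int) < 10 ^ k.toNat := by positivity
  constructor
  · rw [e1]; nlinarith
  · rw [e2]; nlinarith

theorem sums_agree (start end_ : Int) :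
    (∑ n ∈ Finset.Icc start end_, (if goodb n then n else 0)) =
      ∑ k ∈ Finset.Icc (1 : Int) (PySem.Int.floordiv (digitCount end_) 2),
        ∑ n ∈ (Finset.Icc (max ((10:Int) ^ (k-1).toNat) (-(PySem.Int.floordiv (-(max start 1)) ((10:Int) ^ k.toNat + 1))))
                          (min ((10:Int) ^ k.toNat - 1) (PySem.Int.floordiv end_ ((10:Int) ^ k.toNat + 1)))).image
                (fun h => h * ((10:Int) ^ k.toNat + 1)), n := by
  have hK2 : ∀ k : Int, 1 ≤ k → ¬ (k ≤ PySem.Int.floordiv (digitCount end_) 2) →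
      (10:Int) ^ (2 * k.toNat - 1) > end_ := by
    intro k hk hgt
    have hKnn := digitCount_nonneg end_
    have hlt := lt_pow_digitCount end_
    rw [PySem.Int.floordiv_eq_ediv_of_pos (by omega : (0:Int) < 2)] at hgt
    have hexp : (digitCount end_).toNat ≤ 2 * k.toNat - 1 := by omega
    calc end_ < (10:Int) ^ (digitCount end_).toNat := hlt
      _ ≤ (10:Int) ^ (2 * k.toNat - 1) := pow_le_pow_right₀ (by norm_num) hexp
  rw [← Finset.sum_filter]
  rw [show (Finset.Icc start end_).filter (fun n => goodb n = true) =
      (Finset.Icc (1 : Int) (PySem.Int.floordiv (digitCount end_) 2)).biUnion (fun k =>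
        (Finset.Icc (max ((10:Int) ^ (k-1).toNat) (-(PySem.Int.floordiv (-(max start 1)) ((10:Int) ^ k.toNat + 1))))
                    (min ((10:Int) ^ k.toNat - 1) (PySem.Int.floordiv end_ ((10:Int) ^ k.toNat + 1)))).image
          (fun h => h * ((10:Int) ^ k.toNat + 1))) from ?_]
  · apply Finset.sum_biUnion
    intro a ha b hb hab
    simp only [Finset.coe_Icc, Set.mem_Icc] at ha hb
    rw [Function.onFun, Finset.disjoint_left]
    intro n hna hnb
    rw [mem_blockS_iff] at hna hnb
    obtain ⟨h, ⟨ha1, ha2⟩, _, rfl⟩ := hna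
    obtain ⟨h', ⟨hb1, hb2⟩, _, hn'⟩ := hnb
    have B1 := blockS_bracket a h ha.1 ha1 ha2
    have B2 := blockS_bracket b h' hb.1 hb1 hb2
    rw [← hn'] at B2
    rcases lt_trichotomy a b with hlt | heq | hgt
    · have he : 2 * a.toNat ≤ 2 * b.toNat - 1 := by omega
      have := pow_le_pow_right₀ (by norm_num : (1:Int) ≤ 10) he
      omega
    · exact hab heq
    · have he : 2 * b.toNat ≤ 2 * a.toNat - 1 := by omega
      have := pow_le_pow_right₀ (by norm_num : (1:Int) ≤ 10) he
      omega
  · apply Finset.ext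
    intro n
    rw [Finset.mem_filter, Finset.mem_biUnion]
    simp only [Finset.mem_Icc]
    rw [goodb_iff]
    constructor
    · rintro ⟨⟨hs, he⟩, hdub⟩
      have hpos := dubP_pos hdub
      obtain ⟨κ, η, hκ, hlo, hhi, hn⟩ := hdub
      have hκ' : (1:Int) ≤ (κ : Int) := by exact_mod_cast hκ
      have htn : ((κ : Int)).toNat = κ := by omega
      have htn1 : ((κ:Int) - 1).toNat = κ - 1 := by omega
      have hloI : (10:Int) ^ ((κ:Int) - 1).toNat ≤ (η : Int) := by rw [htn1]; exact_mod_cast hlo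
      have hhiI : (η : Int) ≤ (10:Int) ^ ((κ:Int)).toNat - 1 := by
        rw [htn]; have : (η:Int) < (10:Int)^κ := by exact_mod_cast hhi
        omega
      have hnI : n = (η : Int) * ((10:Int) ^ ((κ:Int)).toNat + 1) := by rw [htn]; exact hn
      refine ⟨(κ : Int), ⟨hκ', ?_⟩, ?_⟩
      · by_contra hgt
        have hbig := hK2 (κ : Int) hκ' hgt
        have hbr := blockS_bracket (κ : Int) (η : Int) hκ' hloI hhiI
        omega
      · rw [mem_blockS_iff]
        exact ⟨(η : Int), ⟨hloI, hhiI⟩, ⟨by rw [← hnI]; omega, by rw [← hnI]; exact he⟩, hnI⟩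
    · rintro ⟨k, ⟨hk1, hk2⟩, hmem⟩
      rw [mem_blockS_iff] at hmem
      obtain ⟨h, ⟨h1, h2⟩, ⟨h3, h4⟩, rfl⟩ := hmem
      have hhpos : (0:Int) < h := lt_of_lt_of_le (by positivity) h1
      refine ⟨⟨le_trans (le_max_left _ _) h3, h4⟩, ?_⟩
      refine ⟨k.toNat, h.toNat, by omega, ?_, ?_, ?_⟩
      · have : ((10:Int) ^ (k.toNat - 1)) ≤ (h.toNat : Int) := by
          rw [show (k.toNat - 1) = (k-1).toNat by omega, show ((h.toNat : Int)) = h by omega]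
          exact h1
        exact_mod_cast this
      · have : ((h.toNat : Int)) < (10:Int) ^ k.toNat := by omega
        exact_mod_cast this
      · rw [show ((h.toNat : Int)) = h by omega]

-- ===== VERDICT (by name: the statement is the Claim_ definition above) =====
theorem checkInterval_spec : Claim_equal_checkInterval := by
  intro start end_ _
  unfold Spec_checkInterval
  rw [portA_eq_sum, portB_eq_sum, sums_agree]
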